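-- pv_equiv track=rewrite | github.com/scorixear/AdventOfCode | 2023/7/2.py | get_highest_groups
-- ===== SOURCE A (Python) =====
-- card_to_value = {
--     "A": 13,
--     "K": 12,
--     "Q": 11,
--     "T": 10,
--     "9": 9,
--     "8": 8,
--     "7": 7,
--     "6": 6,
--     "5": 5,
--     "4": 4,
--     "3": 3,
--     "2": 2,
--     "J": 1,
-- }
--
-- def get_highest_groups(hand):
--     card_apperance = {}
--     highest_hit = 0
--     highest_hit_card = ""
--     second_highest_hit = 0
--     card_values = []
--     joker_count = 0
--     for c in hand:
--         card_values.append(card_to_value[c])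
--         if c in card_apperance:
--             card_apperance[c] += 1
--         else:
--             card_apperance[c] = 1
--         if c == "J":
--             joker_count += 1
--         elif card_apperance[c] > highest_hit:
--             if highest_hit_card != c:
--                 second_highest_hit = highest_hit
--                 highest_hit_card = c
--             highest_hit = card_apperance[c]
--         elif card_apperance[c] > second_highest_hit:
--             second_highest_hit = card_apperance[c]
--     return highest_hit + joker_count, second_highest_hit, card_values
-- ===== SOURCE B (Python) =====
-- card_to_value = {
--     "A": 13, "K": 12, "Q": 11, "T": 10, "9": 9, "8": 8, "7": 7,
--     "6": 6, "5": 5, "4": 4, "3": 3, "2": 2, "J": 1,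
-- }
--
-- def get_highest_groups(hand):
--     card_values = []
--     counts = {}
--     joker_count = 0
--     for c in hand:
--         card_values.append(card_to_value[c])
--         if c == "J":
--             joker_count += 1
--         else:
--             counts[c] = counts.get(c, 0) + 1
--     sizes = sorted(counts.values(), reverse=True)
--     highest = (sizes[0] if sizes else 0) + joker_count
--     second = sizes[1] if len(sizes) > 1 else 0
--     return highest, second, card_values
-- ===== Notes on version B (the rewrite author's own statement) =====
-- stated objective: simpler
-- what changed: A tracks highest/second-highest group sizes online with a highest-card register and cascading elif updates; B just builds a count table in one pass (skipping jokers) and reads the top two sizes off sorted(counts.values(), reverse=True).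
import Mathlib
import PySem

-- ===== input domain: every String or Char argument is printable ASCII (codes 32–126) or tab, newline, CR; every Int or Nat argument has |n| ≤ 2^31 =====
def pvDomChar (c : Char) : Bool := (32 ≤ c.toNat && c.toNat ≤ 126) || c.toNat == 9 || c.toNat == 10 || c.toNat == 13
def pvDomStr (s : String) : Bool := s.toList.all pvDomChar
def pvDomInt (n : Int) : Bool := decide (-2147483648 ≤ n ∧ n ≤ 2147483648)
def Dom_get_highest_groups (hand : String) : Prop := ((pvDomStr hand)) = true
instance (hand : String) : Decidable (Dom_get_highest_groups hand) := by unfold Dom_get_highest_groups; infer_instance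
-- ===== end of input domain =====

-- B replaces A's online highest/second-highest tracking (highest-card register + cascading elif)
-- by a single counting pass (skipping jokers) followed by reading the top two entries of the
-- reverse-sorted count table: simpler decomposition, same single iteration over the hand.


-- ===== PORT A =====
-- card_to_value (shared module constant)
def cardToValue : PySem.Dict Char Int :=
  PySem.Dict.ofList [('A', 13), ('K', 12), ('Q', 11), ('T', 10), ('9', 9), ('8', 8),
                     ('7', 7), ('6', 6), ('5', 5), ('4', 4), ('3', 3), ('2', 2), ('J', 1)]

-- A's loop state: card_apperance, highest_hit, highest_hit_card, second_highest_hit, card_values, joker_count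
structure StA where
  appear : PySem.Dict Char Int
  hi : Int
  hiCard : List Char
  sec : Int
  vals : List Int
  jok : Int
deriving Repr, DecidableEq

-- one iteration of A's for-loop (card_to_value[c] is total on Pre_; getD is exact there)
def stepA (st : StA) (c : Char) : StA :=
  let vals := st.vals ++ [cardToValue.getD c 0]
  let appear := if st.appear.contains c then st.appear.insert c (st.appear.getD c 0 + 1)
                else st.appear.insert c 1
  if c = 'J' then
    { st with vals := vals, appear := appear, jok := st.jok + 1 }
  else if appear.getD c 0 > st.hi then
    if st.hiCard ≠ [c] then
      { st with vals := vals, appear := appear, sec := st.hi, hiCard := [c], hi := appear.getD c 0 }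
    else
      { st with vals := vals, appear := appear, hi := appear.getD c 0 }
  else if appear.getD c 0 > st.sec then
    { st with vals := vals, appear := appear, sec := appear.getD c 0 }
  else
    { st with vals := vals, appear := appear }

def get_highest_groups (hand : String) : Int × Int × List Int :=
  let st := hand.toList.foldl stepA ⟨PySem.Dict.empty, 0, [], 0, [], 0⟩
  (st.hi + st.jok, st.sec, st.vals)

-- ===== PORT B =====
-- B's loop state: card_values, counts (no 'J' key ever), joker_count
structure StB where
  vals : List Int
  counts : PySem.Dict Char Int
  jok : Int
deriving Repr, DecidableEq

def stepB (st : StB) (c : Char) : StB :=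
  let vals := st.vals ++ [cardToValue.getD c 0]
  if c = 'J' then { st with vals := vals, jok := st.jok + 1 }
  else { st with vals := vals, counts := st.counts.insert c (st.counts.getD c 0 + 1) }

def get_highest_groups_alt (hand : String) : Int × Int × List Int :=
  let st := hand.toList.foldl stepB ⟨[], PySem.Dict.empty, 0⟩
  let sizes := PySem.List.sorted st.counts.values (fun x => x) true
  let highest := (match sizes with | [] => (0 : Int) | s :: _ => s) + st.jok
  let second := match sizes with | _ :: s :: _ => s | _ => (0 : Int)
  (highest, second, st.vals)

-- ===== PRECONDITION & SPEC =====
-- Pre_ excludes exactly the hands containing a character outside card_to_value,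
-- on which Python's A raises KeyError at the first such character.
def Pre_get_highest_groups (hand : String) : Prop :=
  (hand.toList.all
    (fun c => ['A', 'K', 'Q', 'T', '9', '8', '7', '6', '5', '4', '3', '2', 'J'].contains c)) = true
instance (hand : String) : Decidable (Pre_get_highest_groups hand) := by
  unfold Pre_get_highest_groups; infer_instance

def pvWitness_get_highest_groups : String := "T55J5"

def Spec_get_highest_groups (hand : String) (out : Int × Int × List Int) : Prop :=
  out = get_highest_groups_alt hand
instance (hand : String) (out : Int × Int × List Int) : Decidable (Spec_get_highest_groups hand out) := by
  unfold Spec_get_highest_groups; infer_instance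

-- ===== CLAIM (what is proved, stated in full; the proofs are below) =====
def Claim_equal_get_highest_groups : Prop :=
  ∀ (hand : String), Dom_get_highest_groups hand → Pre_get_highest_groups hand →
    Spec_get_highest_groups hand (get_highest_groups hand)

-- ===== LEMMAS AND PROOFS =====

-- max of a multiset of ints, with 0 for the empty multiset (matches "if sizes else 0")
def mmax (s : Multiset Int) : Int := Multiset.fold max 0 s

theorem mmax_zero : mmax 0 = 0 := rfl

theorem mmax_cons (a : Int) (s : Multiset Int) : mmax (a ::ₘ s) = max a (mmax s) := by
  simp [mmax, Multiset.fold_cons_left]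

theorem mmax_nonneg (s : Multiset Int) : 0 ≤ mmax s := by
  induction s using Multiset.induction with
  | empty => simp [mmax_zero]
  | cons a s ih => rw [mmax_cons]; exact le_trans ih (le_max_right _ _)

theorem le_mmax_of_mem {a : Int} {s : Multiset Int} (h : a ∈ s) : a ≤ mmax s := by
  obtain ⟨t, rfl⟩ := Multiset.exists_cons_of_mem h
  rw [mmax_cons]; exact le_max_left _ _

theorem mmax_le_of_forall {s : Multiset Int} {b : Int} (hb : 0 ≤ b)
    (h : ∀ x ∈ s, x ≤ b) : mmax s ≤ b := by
  induction s using Multiset.induction with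
  | empty => simpa [mmax_zero] using hb
  | cons a s ih =>
      rw [mmax_cons]
      exact max_le (h a (Multiset.mem_cons_self a s))
        (ih (fun x hx => h x (Multiset.mem_cons_of_mem hx)))

theorem mmax_mem_of_pos {s : Multiset Int} (h : 0 < mmax s) : mmax s ∈ s := by
  induction s using Multiset.induction with
  | empty => simp [mmax_zero] at h
  | cons a s ih =>
      rw [mmax_cons] at h ⊢
      rcases le_total (mmax s) a with hle | hle
      · rw [max_eq_left hle]; exact Multiset.mem_cons_self a s
      · rw [max_eq_right hle] at h ⊢
        exact Multiset.mem_cons_of_mem (ih h)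

theorem mmax_erase_le (s : Multiset Int) (a : Int) : mmax (s.erase a) ≤ mmax s := by
  apply mmax_le_of_forall (mmax_nonneg s)
  exact fun x hx => le_mmax_of_mem (Multiset.mem_of_mem_erase hx)

-- the invariant tying A's loop state to B's loop state
def InvAB (a : StA) (b : StB) : Prop :=
  a.vals = b.vals ∧ a.jok = b.jok ∧
  b.counts.keys.Nodup ∧
  b.counts.contains 'J' = false ∧
  (∀ c, c ≠ 'J' → a.appear.get? c = b.counts.get? c) ∧
  (∀ v ∈ b.counts.values, (1 : Int) ≤ v) ∧
  a.hi = mmax (↑b.counts.values) ∧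
  a.sec = mmax ((↑b.counts.values : Multiset Int).erase a.hi) ∧
  ((a.hiCard = [] ∧ b.counts.values = []) ∨
    ∃ k, k ≠ 'J' ∧ a.hiCard = [k] ∧ b.counts.contains k = true ∧ b.counts.getD k 0 = a.hi)

theorem inv_init : InvAB ⟨PySem.Dict.empty, 0, [], 0, [], 0⟩ ⟨[], PySem.Dict.empty, 0⟩ := by
  refine ⟨rfl, rfl, ?_, ?_, fun c _ => rfl, ?_, ?_, ?_, ?_⟩ <;>
    simp [PySem.Dict.empty, mmax_zero]


-- replacing the (unique) entry at key c in an items list, seen on the value multiset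
theorem replace_snd_multiset (its : List (Char × Int)) (c : Char) (v w : Int)
    (hnd : (its.map Prod.fst).Nodup) (hmem : (c, v) ∈ its) :
    (↑((its.map (fun p => if p.1 == c then (c, w) else p)).map Prod.snd) : Multiset Int)
      = w ::ₘ (↑(its.map Prod.snd) : Multiset Int).erase v := by
  induction its with
  | nil => simp at hmem
  | cons p rest ih =>
      obtain ⟨k, u⟩ := p
      simp only [List.map_cons, List.nodup_cons] at hnd
      by_cases hk : k = c
      · have hcne : c ∉ rest.map Prod.fst := hk ▸ hnd.1
        have huv : u = v := by
          rcases List.mem_cons.mp hmem with h | h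
          · exact (Prod.mk.injEq _ _ _ _ ▸ h.symm).2
          · exact absurd (List.mem_map.mpr ⟨(c, v), h, rfl⟩) hcne
        have hid : rest.map (fun p => if p.1 == c then (c, w) else p) = rest := by
          rw [List.map_congr_left (g := id) ?_, List.map_id]
          intro q hq
          have hq1 : q.1 ≠ c := fun hqc => hcne (List.mem_map.mpr ⟨q, hq, hqc⟩)
          simp [hq1]
        have hhead : ((k, u).1 == c) = true := by simp [hk]
        subst huv
        simp only [List.map_cons, hhead, if_true, hid, ← Multiset.cons_coe,
          Multiset.erase_cons_head]
      · have hmem' : (c, v) ∈ rest := by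
          rcases List.mem_cons.mp hmem with h | h
          · exact absurd ((Prod.mk.injEq _ _ _ _ ▸ h.symm).1) hk
          · exact h
        have hif : ((k, u).1 == c) = false := by simp [hk]
        have hrec := ih hnd.2 hmem'
        simp only [List.map_cons, hif, Bool.false_eq_true, if_false, ← Multiset.cons_coe, hrec]
        by_cases huv : u = v
        · subst huv
          have hvm : u ∈ (↑(rest.map Prod.snd) : Multiset Int) := by
            rw [Multiset.mem_coe]
            exact List.mem_map.mpr ⟨(c, u), hmem', rfl⟩
          rw [Multiset.erase_cons_head, Multiset.cons_swap, Multiset.cons_erase hvm]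
        · rw [Multiset.erase_cons_tail _ (by exact huv), Multiset.cons_swap]

theorem values_eq_map_snd (d : PySem.Dict Char Int) : d.values = d.items.map Prod.snd := rfl

theorem keys_eq_map_fst (d : PySem.Dict Char Int) : d.keys = d.items.map Prod.fst := rfl

theorem get?_eq_some_getD_of_contains (d : PySem.Dict Char Int) (c : Char)
    (hc : d.contains c = true) : d.get? c = some (d.getD c 0) := by
  rw [PySem.Dict.contains_eq_isSome_get?] at hc
  obtain ⟨v, hv⟩ := Option.isSome_iff_exists.mp hc
  rw [hv, PySem.Dict.getD_of_get?_eq_some d 0 hv]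

theorem getD_mem_values (d : PySem.Dict Char Int) (c : Char) (hc : d.contains c = true) :
    d.getD c 0 ∈ d.values := by
  have h := get?_eq_some_getD_of_contains d c hc
  have := PySem.Dict.mem_items_of_get?_eq_some d h
  rw [values_eq_map_snd]
  exact List.mem_map.mpr ⟨_, this, rfl⟩

theorem values_insert_contains_ms (d : PySem.Dict Char Int) (c : Char) (w : Int)
    (hnd : d.keys.Nodup) (hc : d.contains c = true) :
    (↑(d.insert c w).values : Multiset Int)
      = w ::ₘ (↑d.values : Multiset Int).erase (d.getD c 0) := by
  have h := get?_eq_some_getD_of_contains d c hc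
  have hm := PySem.Dict.mem_items_of_get?_eq_some d h
  rw [values_eq_map_snd, PySem.Dict.items_insert_of_contains d w hc, values_eq_map_snd]
  exact replace_snd_multiset d.items c _ w (by rw [← keys_eq_map_fst]; exact hnd) hm

theorem values_insert_not_contains (d : PySem.Dict Char Int) (c : Char) (w : Int)
    (hc : d.contains c = false) : (d.insert c w).values = d.values ++ [w] := by
  rw [values_eq_map_snd, PySem.Dict.items_insert_of_not_contains d w hc, List.map_append,
    ← values_eq_map_snd]
  rfl

-- the max value sits in the erased value multiset when TWO distinct keys carry it
theorem mem_snd_erase (its : List (Char × Int)) (c k : Char) (v : Int)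
    (hck : k ≠ c) (hc : (c, v) ∈ its) (hk : (k, v) ∈ its) :
    v ∈ (↑(its.map Prod.snd) : Multiset Int).erase v := by
  have hcm : ((c, v) : Char × Int) ∈ (↑its : Multiset (Char × Int)) := by simpa using hc
  have h1 : ((c, v) : Char × Int) ::ₘ (↑its : Multiset (Char × Int)).erase (c, v) = ↑its :=
    Multiset.cons_erase hcm
  have h2 : (↑(its.map Prod.snd) : Multiset Int)
      = v ::ₘ Multiset.map Prod.snd ((↑its : Multiset (Char × Int)).erase (c, v)) := by
    calc (↑(its.map Prod.snd) : Multiset Int)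
        = Multiset.map Prod.snd (↑its : Multiset (Char × Int)) := (Multiset.map_coe _ _).symm
      _ = Multiset.map Prod.snd (((c, v) : Char × Int) ::ₘ ((↑its : Multiset (Char × Int))).erase (c, v)) := by rw [h1]
      _ = v ::ₘ Multiset.map Prod.snd ((↑its : Multiset (Char × Int)).erase (c, v)) := by
            rw [Multiset.map_cons]
  rw [h2, Multiset.erase_cons_head]
  have hkm : ((k, v) : Char × Int) ∈ (↑its : Multiset (Char × Int)).erase (c, v) :=
    (Multiset.mem_erase_of_ne (by simp [hck])).mpr (by simpa using hk)
  exact Multiset.mem_map_of_mem _ hkm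

theorem values_coe_append_one (l : List Int) (w : Int) :
    (↑(l ++ [w]) : Multiset Int) = w ::ₘ ↑l :=
  Multiset.coe_eq_coe.mpr (List.perm_append_singleton w l)

theorem inv_step (a : StA) (b : StB) (c : Char) (h : InvAB a b) : InvAB (stepA a c) (stepB b c) := by
  obtain ⟨hv, hj, hnd, hJ, hget, hpos, hhi, hsec, hwit⟩ := h
  have hsec0 : 0 ≤ a.sec := hsec ▸ mmax_nonneg _
  have hhi0 : 0 ≤ a.hi := hhi ▸ mmax_nonneg _
  by_cases hcJ : c = 'J'
  · subst hcJ
    simp only [stepA, stepB, reduceIte]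
    refine ⟨by rw [hv], by rw [hj], hnd, hJ, ?_, hpos, hhi, hsec, hwit⟩
    intro c' hc'
    split <;> rw [PySem.Dict.get?_insert, if_neg hc', hget c' hc']
  · have hconA : a.appear.contains c = b.counts.contains c := by
      rw [PySem.Dict.contains_eq_isSome_get?, PySem.Dict.contains_eq_isSome_get?, hget c hcJ]
    have hJc : (('J' : Char) == c) = false := by
      simp only [beq_eq_false_iff_ne, ne_eq]
      exact fun h => hcJ h.symm
    by_cases hcon : b.counts.contains c = true
    · -- c already counted
      have hgD : a.appear.getD c 0 = b.counts.getD c 0 := by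
        rw [PySem.Dict.getD_eq_get?_getD, PySem.Dict.getD_eq_get?_getD, hget c hcJ]
      have hvmem : b.counts.getD c 0 ∈ b.counts.values := getD_mem_values _ _ hcon
      have hv1 : (1 : Int) ≤ b.counts.getD c 0 := hpos _ hvmem
      have hvle : b.counts.getD c 0 ≤ a.hi := by
        rw [hhi]; exact le_mmax_of_mem (Multiset.mem_coe.mpr hvmem)
      have hVins := values_insert_contains_ms b.counts c (b.counts.getD c 0 + 1) hnd hcon
      obtain ⟨k, hkJ, hkC, hkcon, hkD⟩ :
          ∃ k, k ≠ 'J' ∧ a.hiCard = [k] ∧ b.counts.contains k = true ∧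
            b.counts.getD k 0 = a.hi := by
        rcases hwit with ⟨_, hvals⟩ | h
        · rw [hvals] at hvmem; simp at hvmem
        · exact h
      have hnd' := PySem.Dict.nodup_keys_insert b.counts c (b.counts.getD c 0 + 1) hnd
      have hJ' : (b.counts.insert c (b.counts.getD c 0 + 1)).contains 'J' = false := by
        rw [PySem.Dict.contains_insert, hJc, hJ]; rfl
      have hget' : ∀ c', c' ≠ 'J' →
          (a.appear.insert c (b.counts.getD c 0 + 1)).get? c'
            = (b.counts.insert c (b.counts.getD c 0 + 1)).get? c' := by
        intro c' hc'
        rw [PySem.Dict.get?_insert, PySem.Dict.get?_insert]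
        split
        · rfl
        · exact hget c' hc'
      have hpos' : ∀ w ∈ (b.counts.insert c (b.counts.getD c 0 + 1)).values, (1 : Int) ≤ w := by
        intro w hw
        rcases PySem.Dict.mem_values_insert _ _ _ _ hw with rfl | hw'
        · omega
        · exact hpos _ hw'
      simp only [stepA, stepB, if_neg hcJ, hconA, hcon, if_true,
        PySem.Dict.getD_insert_self, hgD]
      by_cases hveq : b.counts.getD c 0 = a.hi
      · rw [if_pos (by omega : b.counts.getD c 0 + 1 > a.hi)]
        have hErase1 : ((b.counts.getD c 0 + 1) ::ₘ
            (↑b.counts.values : Multiset Int).erase (b.counts.getD c 0)).erase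
              (b.counts.getD c 0 + 1)
            = (↑b.counts.values : Multiset Int).erase (b.counts.getD c 0) :=
          Multiset.erase_cons_head _ _
        have hM7 : mmax ((b.counts.getD c 0 + 1) ::ₘ
            (↑b.counts.values : Multiset Int).erase (b.counts.getD c 0))
            = b.counts.getD c 0 + 1 := by
          rw [mmax_cons]
          have h2 : mmax ((↑b.counts.values : Multiset Int).erase (b.counts.getD c 0)) ≤ a.hi :=
            hhi ▸ mmax_erase_le _ _
          have h3 : 0 ≤ mmax ((↑b.counts.values : Multiset Int).erase (b.counts.getD c 0)) :=
            mmax_nonneg _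
          omega
        by_cases hkc : k = c
        · rw [if_neg (by simp [hkC, hkc])]
          refine ⟨by rw [hv], by rw [hj], hnd', hJ', hget', hpos', ?_, ?_, ?_⟩
          · rw [hVins, hM7]
          · rw [hVins, hErase1, hsec, hveq]
          · exact Or.inr ⟨c, hcJ, hkc ▸ hkC, by
              rw [PySem.Dict.contains_insert]; simp, by
              rw [PySem.Dict.getD_insert_self]⟩
        · rw [if_pos (by simp [hkC, hkc])]
          have hc_items : (c, a.hi) ∈ b.counts.items := by
            have := PySem.Dict.mem_items_of_get?_eq_some b.counts
              (get?_eq_some_getD_of_contains b.counts c hcon)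
            rwa [hveq] at this
          have hk_items : (k, a.hi) ∈ b.counts.items := by
            have h1 := get?_eq_some_getD_of_contains b.counts k hkcon
            rw [hkD] at h1
            exact PySem.Dict.mem_items_of_get?_eq_some b.counts h1
          have hhi_in_erase : a.hi ∈ (↑b.counts.values : Multiset Int).erase a.hi := by
            rw [values_eq_map_snd]
            exact mem_snd_erase b.counts.items c k a.hi hkc hc_items hk_items
          have hsec_new : mmax ((↑b.counts.values : Multiset Int).erase a.hi) = a.hi :=
            le_antisymm (hhi ▸ mmax_erase_le _ _) (le_mmax_of_mem hhi_in_erase)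
          refine ⟨by rw [hv], by rw [hj], hnd', hJ', hget', hpos', ?_, ?_, ?_⟩
          · rw [hVins, hM7]
          · rw [hVins, hErase1, hveq, hsec_new]
          · exact Or.inr ⟨c, hcJ, rfl, by
              rw [PySem.Dict.contains_insert]; simp, by
              rw [PySem.Dict.getD_insert_self]⟩
      · have hvlt : b.counts.getD c 0 < a.hi := lt_of_le_of_ne hvle hveq
        rw [if_neg (by omega)]
        have hkc : k ≠ c := fun he => hveq (by rw [← hkD, he])
        have hhiV : a.hi ∈ (↑b.counts.values : Multiset Int) := by
          have := mmax_mem_of_pos (s := (↑b.counts.values : Multiset Int)) (by rw [← hhi]; omega)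
          exact hhi ▸ this
        have hhiVe : a.hi ∈ (↑b.counts.values : Multiset Int).erase (b.counts.getD c 0) :=
          (Multiset.mem_erase_of_ne (by omega)).mpr hhiV
        have hMve : mmax ((↑b.counts.values : Multiset Int).erase (b.counts.getD c 0)) = a.hi :=
          le_antisymm (hhi ▸ mmax_erase_le _ _) (le_mmax_of_mem hhiVe)
        have hM7 : mmax ((b.counts.getD c 0 + 1) ::ₘ
            (↑b.counts.values : Multiset Int).erase (b.counts.getD c 0)) = a.hi := by
          rw [mmax_cons, hMve, max_eq_right (by omega)]
        have hErase : ((b.counts.getD c 0 + 1) ::ₘ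
              (↑b.counts.values : Multiset Int).erase (b.counts.getD c 0)).erase a.hi
            = (b.counts.getD c 0 + 1) ::ₘ
              (((↑b.counts.values : Multiset Int).erase a.hi).erase (b.counts.getD c 0)) := by
          by_cases hveq1 : b.counts.getD c 0 + 1 = a.hi
          · rw [← hveq1, Multiset.erase_cons_head, Multiset.erase_comm]
            exact (Multiset.cons_erase (hveq1 ▸ hhiVe)).symm
          · rw [Multiset.erase_cons_tail _ (by exact hveq1), Multiset.erase_comm]
        have hwit' : Or (a.hiCard = [] ∧
              (b.counts.insert c (b.counts.getD c 0 + 1)).values = [])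
            (∃ k', k' ≠ 'J' ∧ a.hiCard = [k'] ∧
              (b.counts.insert c (b.counts.getD c 0 + 1)).contains k' = true ∧
              (b.counts.insert c (b.counts.getD c 0 + 1)).getD k' 0 = a.hi) :=
          Or.inr ⟨k, hkJ, hkC, by
            rw [PySem.Dict.contains_insert]; simp [hkcon], by
            rw [PySem.Dict.getD_insert_of_ne _ _ _ hkc]; exact hkD⟩
        by_cases hsb : b.counts.getD c 0 + 1 > a.sec
        · rw [if_pos hsb]
          refine ⟨by rw [hv], by rw [hj], hnd', hJ', hget', hpos', ?_, ?_, hwit'⟩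
          · rw [hVins, hM7, hhi]
          · show b.counts.getD c 0 + 1
                = mmax ((↑(b.counts.insert c (b.counts.getD c 0 + 1)).values
                    : Multiset Int).erase a.hi)
            rw [hVins, hErase, mmax_cons]
            have h1 : mmax ((((↑b.counts.values : Multiset Int).erase a.hi).erase
                (b.counts.getD c 0))) ≤ a.sec :=
              le_trans (mmax_erase_le _ _) (le_of_eq hsec.symm)
            rw [max_eq_left (by omega)]
        · rw [if_neg hsb]
          have hsecpos : 0 < a.sec := by omega
          have hsmem : a.sec ∈ (↑b.counts.values : Multiset Int).erase a.hi := by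
            have := mmax_mem_of_pos
              (s := (↑b.counts.values : Multiset Int).erase a.hi) (by rw [← hsec]; omega)
            exact hsec ▸ this
          have hsmem' : a.sec ∈ (((↑b.counts.values : Multiset Int).erase a.hi).erase
              (b.counts.getD c 0)) := (Multiset.mem_erase_of_ne (by omega)).mpr hsmem
          refine ⟨by rw [hv], by rw [hj], hnd', hJ', hget', hpos', ?_, ?_, hwit'⟩
          · rw [hVins, hM7, hhi]
          · show a.sec
                = mmax ((↑(b.counts.insert c (b.counts.getD c 0 + 1)).values
                    : Multiset Int).erase a.hi)
            rw [hVins, hErase, mmax_cons]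
            have h1 : mmax ((((↑b.counts.values : Multiset Int).erase a.hi).erase
                (b.counts.getD c 0))) ≤ a.sec :=
              le_trans (mmax_erase_le _ _) (le_of_eq hsec.symm)
            have h2 : a.sec ≤ mmax ((((↑b.counts.values : Multiset Int).erase a.hi).erase
                (b.counts.getD c 0))) := le_mmax_of_mem hsmem'
            rw [max_eq_right (by omega)]
            omega
    · -- fresh card
      have hconf : b.counts.contains c = false := by simpa using hcon
      have hgD0 : b.counts.getD c 0 = 0 := PySem.Dict.getD_of_not_contains _ 0 hconf
      have hvals' := values_insert_not_contains b.counts c (b.counts.getD c 0 + 1) hconf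
      have hnd' := PySem.Dict.nodup_keys_insert b.counts c (b.counts.getD c 0 + 1) hnd
      have hJ' : (b.counts.insert c (b.counts.getD c 0 + 1)).contains 'J' = false := by
        rw [PySem.Dict.contains_insert, hJc, hJ]; rfl
      have hget' : ∀ c', c' ≠ 'J' →
          (a.appear.insert c 1).get? c'
            = (b.counts.insert c (b.counts.getD c 0 + 1)).get? c' := by
        intro c' hc'
        rw [PySem.Dict.get?_insert, PySem.Dict.get?_insert, hgD0]
        split
        · rfl
        · exact hget c' hc'
      have hpos' : ∀ w ∈ (b.counts.insert c (b.counts.getD c 0 + 1)).values, (1 : Int) ≤ w := by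
        intro w hw
        rcases PySem.Dict.mem_values_insert _ _ _ _ hw with rfl | hw'
        · omega
        · exact hpos _ hw'
      have hVapp : (↑(b.counts.insert c (b.counts.getD c 0 + 1)).values : Multiset Int)
          = 1 ::ₘ (↑b.counts.values : Multiset Int) := by
        rw [hvals', values_coe_append_one, hgD0]
        norm_num
      simp only [stepA, stepB, if_neg hcJ, hconA, hconf, Bool.false_eq_true, if_false,
        PySem.Dict.getD_insert_self]
      by_cases hhiz : a.hi = 0
      · have hVnil : b.counts.values = [] := by
          by_contra hne
          obtain ⟨x, hx⟩ := List.exists_mem_of_ne_nil _ hne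
          have h1 := hpos x hx
          have h2 := le_mmax_of_mem (s := (↑b.counts.values : Multiset Int))
            (Multiset.mem_coe.mpr hx)
          rw [← hhi] at h2
          omega
        have hCnil : a.hiCard = [] := by
          rcases hwit with ⟨h1, _⟩ | ⟨k, _, _, hkcon, _⟩
          · exact h1
          · have := getD_mem_values _ _ hkcon
            rw [hVnil] at this
            simp at this
        rw [if_pos (by omega : (1 : Int) > a.hi), if_pos (by rw [hCnil]; simp)]
        refine ⟨by rw [hv], by rw [hj], hnd', hJ', hget', hpos', ?_, ?_, ?_⟩
        · show (1 : Int)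
              = mmax (↑(b.counts.insert c (b.counts.getD c 0 + 1)).values : Multiset Int)
          rw [hVapp, hVnil]
          decide
        · show a.hi = mmax ((↑(b.counts.insert c (b.counts.getD c 0 + 1)).values
              : Multiset Int).erase 1)
          rw [hVapp, hVnil]
          have : (((1 : Int) ::ₘ (↑([] : List Int) : Multiset Int)).erase 1) = 0 := by decide
          rw [this, mmax_zero]
          omega
        · exact Or.inr ⟨c, hcJ, rfl, by
            rw [PySem.Dict.contains_insert]; simp, by
            show (b.counts.insert c (b.counts.getD c 0 + 1)).getD c 0 = 1
            rw [PySem.Dict.getD_insert_self]; omega⟩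
      · have hhi1 : (1 : Int) ≤ a.hi := by omega
        rw [if_neg (by omega)]
        have hhiV : a.hi ∈ (↑b.counts.values : Multiset Int) := by
          have := mmax_mem_of_pos (s := (↑b.counts.values : Multiset Int)) (by rw [← hhi]; omega)
          exact hhi ▸ this
        have hEr : ((1 : Int) ::ₘ (↑b.counts.values : Multiset Int)).erase a.hi
            = 1 ::ₘ (↑b.counts.values : Multiset Int).erase a.hi := by
          by_cases h1 : (1 : Int) = a.hi
          · rw [← h1, Multiset.erase_cons_head]
            exact (Multiset.cons_erase (h1 ▸ hhiV)).symm
          · exact Multiset.erase_cons_tail _ (by exact h1)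
        have hM7 : mmax ((1 : Int) ::ₘ (↑b.counts.values : Multiset Int)) = a.hi := by
          rw [mmax_cons, ← hhi, max_eq_right hhi1]
        have hwit' : Or (a.hiCard = [] ∧
              (b.counts.insert c (b.counts.getD c 0 + 1)).values = [])
            (∃ k', k' ≠ 'J' ∧ a.hiCard = [k'] ∧
              (b.counts.insert c (b.counts.getD c 0 + 1)).contains k' = true ∧
              (b.counts.insert c (b.counts.getD c 0 + 1)).getD k' 0 = a.hi) := by
          rcases hwit with ⟨_, hvals0⟩ | ⟨k, hkJ, hkC, hkcon, hkD⟩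
          · exfalso
            rw [hhi, hvals0] at hhiz
            exact hhiz (by rfl)
          · have hkc : k ≠ c := fun he => by rw [he, hconf] at hkcon; exact Bool.false_ne_true hkcon
            exact Or.inr ⟨k, hkJ, hkC, by
              rw [PySem.Dict.contains_insert]; simp [hkcon], by
              rw [PySem.Dict.getD_insert_of_ne _ _ _ hkc]; exact hkD⟩
        by_cases hsb : (1 : Int) > a.sec
        · rw [if_pos hsb]
          refine ⟨by rw [hv], by rw [hj], hnd', hJ', hget', hpos', ?_, ?_, hwit'⟩
          · rw [hVapp, hM7, hhi]
          · rw [hVapp, hEr, mmax_cons, ← hsec, max_eq_left (by omega)]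
        · rw [if_neg hsb]
          refine ⟨by rw [hv], by rw [hj], hnd', hJ', hget', hpos', ?_, ?_, hwit'⟩
          · rw [hVapp, hM7, hhi]
          · rw [hVapp, hEr, mmax_cons, ← hsec, max_eq_right (by omega)]

theorem inv_fold (l : List Char) (a : StA) (b : StB) (h : InvAB a b) :
    InvAB (l.foldl stepA a) (l.foldl stepB b) := by
  induction l generalizing a b with
  | nil => exact h
  | cons c l ih => exact ih _ _ (inv_step a b c h)

-- reverse-sorted list of positive ints: head is mmax, second entry is mmax of the rest
theorem sorted_desc_top_two (l : List Int) (hpos : ∀ v ∈ l, (1 : Int) ≤ v) :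
    ((match PySem.List.sorted l (fun x => x) true with | [] => (0 : Int) | s :: _ => s)
        = mmax ↑l) ∧
    ((match PySem.List.sorted l (fun x => x) true with | _ :: s :: _ => s | _ => (0 : Int))
        = mmax ((↑l : Multiset Int).erase (mmax ↑l))) := by
  have hperm : (PySem.List.sorted l (fun x => x) true).Perm l := PySem.List.sorted_perm l _ _
  have hpw : (PySem.List.sorted l (fun x => x) true).Pairwise (fun a b => b ≤ a) := by
    simpa using PySem.List.sorted_pairwise_rev (xs := l) (key := fun x => x)
  have hml : (↑(PySem.List.sorted l (fun x => x) true) : Multiset Int) = ↑l :=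
    Multiset.coe_eq_coe.mpr hperm
  rcases hs : PySem.List.sorted l (fun x => x) true with _ | ⟨a, t⟩
  · have : l = [] := by simpa [hs] using hperm
    subst this
    simp [mmax_zero]
  · rw [hs] at hml hpw hperm
    have hmem : ∀ x ∈ a :: t, x ∈ l := fun x hx => hperm.mem_iff.mp hx
    have hcons : (↑l : Multiset Int) = a ::ₘ ↑t := by
      rw [← hml]; rfl
    have hta : ∀ x ∈ t, x ≤ a := by
      intro x hx; exact (List.pairwise_cons.mp hpw).1 x hx
    have hhead : mmax ↑l = a := by
      rw [hcons, mmax_cons]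
      have : mmax ↑t ≤ a := mmax_le_of_forall
        (le_trans zero_le_one (hpos a (hmem a (List.mem_cons_self)))) (fun x hx => hta x hx)
      omega
    have herase : ((↑l : Multiset Int).erase (mmax ↑l)) = ↑t := by
      rw [hhead, hcons, Multiset.erase_cons_head]
    refine ⟨hhead.symm, ?_⟩
    rw [herase]
    rcases t with _ | ⟨s, t'⟩
    · simp [mmax_zero]
    · have hpw' : (s :: t').Pairwise (fun a b => b ≤ a) := (List.pairwise_cons.mp hpw).2
      have : mmax (↑(s :: t') : Multiset Int) = s := by
        have hc : (↑(s :: t') : Multiset Int) = s ::ₘ ↑t' := rfl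
        rw [hc, mmax_cons]
        have : mmax ↑t' ≤ s := mmax_le_of_forall
          (le_trans zero_le_one (hpos s (hmem s (List.mem_cons_of_mem _ List.mem_cons_self))))
          (fun x hx => (List.pairwise_cons.mp hpw').1 x hx)
        omega
      simpa using this.symm

-- ===== VERDICT (by name: the statement is the Claim_ definition above) =====
theorem get_highest_groups_spec : Claim_equal_get_highest_groups := by
  intro hand _ _
  unfold Spec_get_highest_groups get_highest_groups get_highest_groups_alt
  have h := inv_fold hand.toList _ _ inv_init
  set a := hand.toList.foldl stepA ⟨PySem.Dict.empty, 0, [], 0, [], 0⟩ with ha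
  set b := hand.toList.foldl stepB ⟨[], PySem.Dict.empty, 0⟩ with hb
  obtain ⟨hv, hj, _, _, _, hpos, hhi, hsec, _⟩ := h
  obtain ⟨h1, h2⟩ := sorted_desc_top_two b.counts.values (fun v hv => hpos v hv)
  simp only [h1, h2, hv, hj, hhi, hsec]
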